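-- pv_equiv track=rewrite | github.com/pypi-data/pypi-mirror-402 | packages/wy-qcos/wy_qcos-1.0.1.tar.gz/wy_qcos-1.0.1/src/wy_qcos/engine/job_engine.py | split_dict
-- ===== SOURCE A (Python) =====
-- def split_dict(orig_dict, split_len):
--     """Split dict.
--
--     Args:
--         orig_dict: orig_dict
--         split_len: split_len
--
--     Returns:
--         measure_results
--     """
--     measure_results = [{} for _ in split_len]
--     for key, value in orig_dict.items():
--         current_index = 0
--         for i, length in enumerate(split_len):
--             end_index = current_index + length
--             sub_key = key[current_index:end_index]
--             measure_results[i][sub_key] = value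
--             current_index = end_index
--     return measure_results
-- ===== SOURCE B (Python) =====
-- def split_dict(orig_dict, split_len):
--     values = list(orig_dict.values())
--     rows = []
--     for key in orig_dict:
--         pos, row = 0, []
--         for length in split_len:
--             row.append(key[pos:pos + length])
--             pos += length
--         rows.append(row)
--     if not rows:
--         return [{} for _ in split_len]
--     return [dict(zip(column, values)) for column in zip(*rows)]
-- ===== Notes on version B (the rewrite author's own statement) =====
-- stated objective: alternative
-- what changed: B never mutates per-segment dicts during the key scan: it first builds the full matrix of key substrings (one row per key), transposes it with zip(*rows), and constructs each segment's dict in one shot from dict(zip(column, values)); A instead keeps k dicts and updates all of them in place while iterating the keys.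
import Mathlib
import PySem

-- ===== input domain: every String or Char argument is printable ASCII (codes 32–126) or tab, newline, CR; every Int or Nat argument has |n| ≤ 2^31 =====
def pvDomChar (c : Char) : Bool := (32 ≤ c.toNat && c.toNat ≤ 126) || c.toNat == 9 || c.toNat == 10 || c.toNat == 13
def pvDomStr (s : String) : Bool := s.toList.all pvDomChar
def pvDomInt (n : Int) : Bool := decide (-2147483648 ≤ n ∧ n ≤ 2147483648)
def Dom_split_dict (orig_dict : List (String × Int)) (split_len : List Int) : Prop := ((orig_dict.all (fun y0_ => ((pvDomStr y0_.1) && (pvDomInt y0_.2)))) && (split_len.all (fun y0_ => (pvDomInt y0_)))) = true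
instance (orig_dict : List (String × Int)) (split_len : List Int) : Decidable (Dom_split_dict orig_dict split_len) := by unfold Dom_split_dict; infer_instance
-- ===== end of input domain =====

-- B builds the matrix of key substrings, transposes it (zip(*rows)), and constructs each
-- segment's dict at once from its column, instead of A's in-place updates of k dicts per key.

-- ===== PORT A =====
-- literal transliteration of A: per key a running current_index, updating measure_results[i] in place
def split_dict (orig_dict : List (String × Int)) (split_len : List Int) : List (List (String × Int)) :=
  let measure_results : List (PySem.Dict String Int) := split_len.map (fun _ => PySem.Dict.empty)
  let final := orig_dict.foldl (fun mr kv =>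
    ((PySem.List.enumerate split_len 0).foldl
      (fun (st : Int × List (PySem.Dict String Int)) il =>
        let end_index := st.1 + il.2
        let sub_key := PySem.Str.slice kv.1 (some st.1) (some end_index)
        (end_index, st.2.set il.1.toNat ((PySem.List.pyGetD st.2 il.1 PySem.Dict.empty).insert sub_key kv.2)))
      (0, mr)).2) measure_results
  final.map (·.items)

-- ===== PORT B =====
-- hand port of Python's zip(*rows): yield the heads of all rows until some row is exhausted
-- (exact: zip truncates at the shortest row; zip() of no rows yields nothing)
def pvZipStar (rows : List (List String)) : List (List String) :=
  match rows with
  | [] => []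
  | r :: rs =>
    if (r :: rs).any (·.isEmpty) then []
    else (r.headD "" :: rs.map (·.headD "")) :: pvZipStar (r.tail :: rs.map (·.tail))
termination_by (rows.headD []).length
decreasing_by
  simp only [List.any_cons, Bool.or_eq_true, not_or] at *
  cases r with
  | nil => simp at *
  | cons a r' => simp

-- literal transliteration of B: substring matrix row-by-row, transpose, dict(zip(column, values))
def split_dict_alt (orig_dict : List (String × Int)) (split_len : List Int) : List (List (String × Int)) :=
  let values := orig_dict.map (·.2)
  let rows := orig_dict.map (fun kv =>
    (split_len.foldl
      (fun (st : Int × List String) length =>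
        (st.1 + length, st.2 ++ [PySem.Str.slice kv.1 (some st.1) (some (st.1 + length))]))
      (0, [])).2)
  if rows.isEmpty then split_len.map (fun _ => (PySem.Dict.empty : PySem.Dict String Int).items)
  else (pvZipStar rows).map (fun column =>
    ((column.zip values).foldl (fun (d : PySem.Dict String Int) p => d.insert p.1 p.2)
      PySem.Dict.empty).items)

-- ===== PRECONDITION & SPEC =====
def Spec_split_dict (orig_dict : List (String × Int)) (split_len : List Int) (out : List (List (String × Int))) : Prop := out = split_dict_alt orig_dict split_len
instance (orig_dict : List (String × Int)) (split_len : List Int) (out : List (List (String × Int))) : Decidable (Spec_split_dict orig_dict split_len out) := by unfold Spec_split_dict; infer_instance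

-- ===== CLAIM (what is proved, stated in full; the proofs are below) =====
def Claim_equal_split_dict : Prop := ∀ (orig_dict : List (String × Int)) (split_len : List Int), Dom_split_dict orig_dict split_len → Spec_split_dict orig_dict split_len (split_dict orig_dict split_len)

-- ===== LEMMAS AND PROOFS =====

-- the boundary table both programs implicitly traverse
def pvBounds (c : Int) : List Int → List (Int × Int)
  | [] => []
  | l :: ls => (c, c + l) :: pvBounds (c + l) ls

-- one key applied to every segment dict (what A's inner loop does, boundary-wise)
def pvUpdAll (k : String) (v : Int) : List (Int × Int) → List (PySem.Dict String Int) → List (PySem.Dict String Int)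
  | se :: bs, d :: ds => d.insert (PySem.Str.slice k (some se.1) (some se.2)) v :: pvUpdAll k v bs ds
  | _, _ => []

-- per-segment folds over orig_dict, each starting from its own dict (the transposed form)
def pvPerSeg (od : List (String × Int)) : List (Int × Int) → List (PySem.Dict String Int) → List (PySem.Dict String Int)
  | se :: bs, d :: ds =>
      (od.foldl (fun d kv => d.insert (PySem.Str.slice kv.1 (some se.1) (some se.2)) kv.2) d) :: pvPerSeg od bs ds
  | _, _ => []

lemma pvBounds_length (sl : List Int) : ∀ c, (pvBounds c sl).length = sl.length := by
  induction sl with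
  | nil => intro c; rfl
  | cons l ls ih => intro c; simp [pvBounds, ih]

lemma pvUpdAll_length (k : String) (v : Int) :
    ∀ (bs : List (Int × Int)) (ds : List (PySem.Dict String Int)), ds.length = bs.length →
      (pvUpdAll k v bs ds).length = bs.length := by
  intro bs
  induction bs with
  | nil => intro ds _; simp [pvUpdAll]
  | cons b bs ih =>
      intro ds h
      cases ds with
      | nil => simp at h
      | cons d ds => simp [pvUpdAll]; exact ih ds (by simpa using h)

lemma pvGetMid {α : Type} (e : α) : ∀ (pre ds : List α) (d : α),
    (pre ++ d :: ds).getD pre.length e = d := by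
  intro pre
  induction pre with
  | nil => intro ds d; rfl
  | cons p pre ih => intro ds d; simp only [List.cons_append, List.length_cons, List.getD_cons_succ]; exact ih ds d

lemma pvSetMid {α : Type} : ∀ (pre ds : List α) (d x : α),
    (pre ++ d :: ds).set pre.length x = pre ++ x :: ds := by
  intro pre
  induction pre with
  | nil => intro ds d x; rfl
  | cons p pre ih => intro ds d x; simp [ih]

-- A's inner loop (over enumerate split_len) applies the key to every dict, boundary-wise
lemma pvInner (k : String) (v : Int) :
    ∀ (sl : List Int) (pre ds : List (PySem.Dict String Int)) (c : Int), ds.length = sl.length →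
      ((PySem.List.enumerate sl (pre.length : Int)).foldl
        (fun (st : Int × List (PySem.Dict String Int)) il =>
          let end_index := st.1 + il.2
          let sub_key := PySem.Str.slice k (some st.1) (some end_index)
          (end_index, st.2.set il.1.toNat ((PySem.List.pyGetD st.2 il.1 PySem.Dict.empty).insert sub_key v)))
        (c, pre ++ ds)).2
      = pre ++ pvUpdAll k v (pvBounds c sl) ds := by
  intro sl
  induction sl with
  | nil =>
      intro pre ds c h
      cases ds with
      | nil => simp [PySem.List.enumerate_nil, pvBounds, pvUpdAll]
      | cons d ds => simp at h
  | cons l ls ih =>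
      intro pre ds c h
      cases ds with
      | nil => simp at h
      | cons d ds =>
          rw [PySem.List.enumerate_cons, List.foldl_cons]
          have hget : PySem.List.pyGetD (pre ++ d :: ds) (pre.length : Int) PySem.Dict.empty = d := by
            rw [PySem.List.pyGetD_natCast]; exact pvGetMid _ pre ds d
          have hset : ∀ x, (pre ++ d :: ds).set ((pre.length : Int)).toNat x = pre ++ x :: ds := by
            intro x; simp only [Int.toNat_natCast]; exact pvSetMid pre ds d x
          simp only [hget, hset]
          have hlen : ((pre.length : Int) + 1) = (((pre ++ [d.insert (PySem.Str.slice k (some c) (some (c + l))) v]).length : Nat) : Int) := by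
            simp
          rw [hlen]
          have := ih (pre ++ [d.insert (PySem.Str.slice k (some c) (some (c + l))) v]) ds (c + l) (by simpa using h)
          simpa [pvBounds, pvUpdAll] using this

-- pvPerSeg absorbs one key's pvUpdAll into each per-segment fold
lemma pvPerSeg_upd (od : List (String × Int)) (k : String) (v : Int) :
    ∀ (bs : List (Int × Int)) (ds : List (PySem.Dict String Int)), ds.length = bs.length →
      pvPerSeg od bs (pvUpdAll k v bs ds) = pvPerSeg ((k, v) :: od) bs ds := by
  intro bs
  induction bs with
  | nil => intro ds h; simp [pvPerSeg]
  | cons b bs ih =>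
      intro ds h
      cases ds with
      | nil => simp at h
      | cons d ds => simp [pvUpdAll, pvPerSeg, ih ds (by simpa using h)]

-- loop interchange: folding key-wise with pvUpdAll equals the per-segment folds
lemma pvInterchange :
    ∀ (od : List (String × Int)) (bs : List (Int × Int)) (ds : List (PySem.Dict String Int)), ds.length = bs.length →
      od.foldl (fun mr kv => pvUpdAll kv.1 kv.2 bs mr) ds = pvPerSeg od bs ds := by
  intro od
  induction od with
  | nil =>
      intro bs
      induction bs with
      | nil => intro ds h; cases ds with
        | nil => rfl
        | cons d ds => simp at h
      | cons b bs ih => intro ds h; cases ds with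
        | nil => simp at h
        | cons d ds =>
            have hh := ih ds (by simpa using h)
            simp only [List.foldl_nil] at hh
            simp [pvPerSeg, ← hh]
  | cons kv od ih =>
      intro bs ds h
      rw [List.foldl_cons, ih bs _ (pvUpdAll_length kv.1 kv.2 bs ds h),
          pvPerSeg_upd od kv.1 kv.2 bs ds h]

-- on all-empty initial dicts pvPerSeg is a plain map over the boundary table
lemma pvPerSeg_empty (od : List (String × Int)) :
    ∀ (bs : List (Int × Int)) (sl : List Int), sl.length = bs.length →
      pvPerSeg od bs (sl.map (fun _ => PySem.Dict.empty))
      = bs.map (fun se =>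
          od.foldl (fun (d : PySem.Dict String Int) kv =>
            d.insert (PySem.Str.slice kv.1 (some se.1) (some se.2)) kv.2) PySem.Dict.empty) := by
  intro bs
  induction bs with
  | nil => intro sl h; cases sl with
    | nil => rfl
    | cons l ls => simp at h
  | cons b bs ih =>
      intro sl h
      cases sl with
      | nil => simp at h
      | cons l ls =>
          simp only [List.map_cons, pvPerSeg]
          rw [ih ls (by simpa using h)]

-- A's key-wise fold equals the key-wise fold with pvUpdAll (via pvInner per step)
lemma pvOuterEq (sl : List Int) :
    ∀ (od : List (String × Int)) (ds : List (PySem.Dict String Int)), ds.length = sl.length →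
      od.foldl (fun mr kv =>
        ((PySem.List.enumerate sl 0).foldl
          (fun (st : Int × List (PySem.Dict String Int)) il =>
            let end_index := st.1 + il.2
            let sub_key := PySem.Str.slice kv.1 (some st.1) (some end_index)
            (end_index, st.2.set il.1.toNat ((PySem.List.pyGetD st.2 il.1 PySem.Dict.empty).insert sub_key kv.2)))
          (0, mr)).2) ds
      = od.foldl (fun mr kv => pvUpdAll kv.1 kv.2 (pvBounds 0 sl) mr) ds := by
  intro od
  induction od with
  | nil => intro ds h; rfl
  | cons kv od ih =>
      intro ds h
      rw [List.foldl_cons, List.foldl_cons]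
      have hstep : ((PySem.List.enumerate sl 0).foldl
          (fun (st : Int × List (PySem.Dict String Int)) il =>
            let end_index := st.1 + il.2
            let sub_key := PySem.Str.slice kv.1 (some st.1) (some end_index)
            (end_index, st.2.set il.1.toNat ((PySem.List.pyGetD st.2 il.1 PySem.Dict.empty).insert sub_key kv.2)))
          (0, ds)).2 = pvUpdAll kv.1 kv.2 (pvBounds 0 sl) ds := by
        simpa using pvInner kv.1 kv.2 sl [] ds 0 h
      rw [hstep]
      exact ih _ (by rw [pvUpdAll_length kv.1 kv.2 _ ds (by rw [h, pvBounds_length]), pvBounds_length])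

-- A in canonical form: one per-segment fold per boundary pair
lemma pvA_eq (od : List (String × Int)) (sl : List Int) :
    split_dict od sl
    = (pvBounds 0 sl).map (fun se =>
        (od.foldl (fun (d : PySem.Dict String Int) kv =>
          d.insert (PySem.Str.slice kv.1 (some se.1) (some se.2)) kv.2) PySem.Dict.empty).items) := by
  simp only [split_dict]
  rw [pvOuterEq sl od (sl.map (fun _ => PySem.Dict.empty)) (by simp),
      pvInterchange od (pvBounds 0 sl) _ (by simp [pvBounds_length]),
      pvPerSeg_empty od (pvBounds 0 sl) sl (by rw [pvBounds_length]),
      List.map_map]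
  rfl

-- B's per-key row fold produces the slices along the boundary table
lemma pvRowEq (k : String) :
    ∀ (sl : List Int) (acc : List String) (c : Int),
      (sl.foldl (fun (st : Int × List String) length =>
        (st.1 + length, st.2 ++ [PySem.Str.slice k (some st.1) (some (st.1 + length))])) (c, acc)).2
      = acc ++ (pvBounds c sl).map (fun se => PySem.Str.slice k (some se.1) (some se.2)) := by
  intro sl
  induction sl with
  | nil => intro acc c; simp [pvBounds]
  | cons l ls ih => intro acc c; rw [List.foldl_cons, ih]; simp [pvBounds]

-- transpose of a rectangular matrix given as maps: zip(*rows) column-wise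
lemma pvZipStar_map {β : Type} (f : (String × Int) → β → String) :
    ∀ (bs : List β) (kv0 : String × Int) (od : List (String × Int)),
      pvZipStar ((kv0 :: od).map (fun kv => bs.map (f kv)))
      = bs.map (fun b => (kv0 :: od).map (fun kv => f kv b)) := by
  intro bs
  induction bs with
  | nil => intro kv0 od; simp [pvZipStar]
  | cons b bs ih =>
      intro kv0 od
      rw [List.map_cons]
      rw [pvZipStar]
      have hne : ¬ (((b :: bs).map (f kv0)) :: od.map (fun kv => (b :: bs).map (f kv))).any (·.isEmpty) = true := by
        simp [List.any_eq_true]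
      simp only [List.map_cons, List.any_cons] at hne ⊢
      rw [if_neg hne]
      simp only [List.headD_cons, List.tail_cons, List.map_map, Function.comp_def]
      have := ih kv0 od
      simp only [List.map_cons] at this
      rw [this]

-- the trivial branch: maps of a constant over equally long lists agree
lemma pvBounds_const_map {β : Type} (x : β) (sl : List Int) :
    ∀ c, (pvBounds c sl).map (fun _ => x) = sl.map (fun _ => x) := by
  induction sl with
  | nil => intro c; rfl
  | cons l ls ih => intro c; simp [pvBounds, ih]

-- B in the same canonical form
lemma pvB_eq (od : List (String × Int)) (sl : List Int) :
    split_dict_alt od sl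
    = (pvBounds 0 sl).map (fun se =>
        (od.foldl (fun (d : PySem.Dict String Int) kv =>
          d.insert (PySem.Str.slice kv.1 (some se.1) (some se.2)) kv.2) PySem.Dict.empty).items) := by
  simp only [split_dict_alt]
  cases od with
  | nil =>
      simp only [List.map_nil, List.isEmpty_nil, if_true, List.foldl_nil]
      rw [← pvBounds_const_map ((PySem.Dict.empty : PySem.Dict String Int).items) sl 0]
  | cons kv0 od =>
      simp only [List.map_cons, List.isEmpty_cons, if_false, Bool.false_eq_true]
      have hrow : ∀ kv : String × Int,
          (sl.foldl (fun (st : Int × List String) length =>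
            (st.1 + length, st.2 ++ [PySem.Str.slice kv.1 (some st.1) (some (st.1 + length))])) ((0 : Int), ([] : List String))).2
          = (pvBounds 0 sl).map (fun se => PySem.Str.slice kv.1 (some se.1) (some se.2)) := by
        intro kv; simpa using pvRowEq kv.1 sl [] 0
      rw [show (fun kv : String × Int =>
            (sl.foldl (fun (st : Int × List String) length =>
              (st.1 + length, st.2 ++ [PySem.Str.slice kv.1 (some st.1) (some (st.1 + length))])) ((0 : Int), ([] : List String))).2)
          = (fun kv : String × Int => (pvBounds 0 sl).map (fun se => PySem.Str.slice kv.1 (some se.1) (some se.2))) from funext hrow]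
      rw [hrow kv0]
      rw [show ((pvBounds 0 sl).map (fun se => PySem.Str.slice kv0.1 (some se.1) (some se.2))
            :: od.map (fun kv => (pvBounds 0 sl).map (fun se => PySem.Str.slice kv.1 (some se.1) (some se.2))))
          = (kv0 :: od).map (fun kv => (pvBounds 0 sl).map (fun se => PySem.Str.slice kv.1 (some se.1) (some se.2))) from rfl]
      rw [pvZipStar_map (fun kv se => PySem.Str.slice kv.1 (some se.1) (some se.2)) (pvBounds 0 sl) kv0 od]
      rw [List.map_map]
      apply List.map_congr_left
      intro se _
      simp only [Function.comp]
      rw [show (kv0.2 :: od.map (fun x : String × Int => x.2)) = (kv0 :: od).map (fun x : String × Int => x.2) from rfl,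
          List.zip_map', List.foldl_map]

-- ===== VERDICT (by name: the statement is the Claim_ definition above) =====
theorem split_dict_spec : Claim_equal_split_dict := by
  intro od sl _
  show split_dict od sl = split_dict_alt od sl
  rw [pvA_eq, pvB_eq]
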